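-- pv_equiv track=rewrite | github.com/adakaleh/sireum | sireum.py | transform_board
-- ===== SOURCE A (Python) =====
-- EMPTY = 0
--
-- OM1 = 3 # push: blue vertical, red horizontal | flip: blue
--
-- OM2 = 4 # push: blue horizontal, red vertical | flip: red
--
-- def piece_at(board, row, col):
--     if -1 < row < len(board) and -1 < col < len(board[row]):
--         return board[row][col]
--     return EMPTY
--
-- def copy_board(board):
--     new_board = []
--     for row in board:
--         new_board.append(row.copy())
--     return new_board
--
-- def transform_board(board, om, moves):
--     board = copy_board(board)
--     for move in moves:
--         # north
--         if move == 8 and piece_at(board, om[0]-1, om[1]):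
--             board[om[0]-1][om[1]] = board[om[0]][om[1]]
--             board[om[0]][om[1]] = EMPTY
--             om = (om[0]-1, om[1])
--         # south
--         elif move == 2 and piece_at(board, om[0]+1, om[1]):
--             board[om[0]+1][om[1]] = board[om[0]][om[1]]
--             board[om[0]][om[1]] = EMPTY
--             om = (om[0]+1, om[1])
--         # east
--         elif move == 4 and piece_at(board, om[0], om[1]-1):
--             board[om[0]][om[1]-1] = board[om[0]][om[1]]
--             board[om[0]][om[1]] = EMPTY
--             om = (om[0], om[1]-1)
--         # west
--         elif move == 6 and piece_at(board, om[0], om[1]+1):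
--             board[om[0]][om[1]+1] = board[om[0]][om[1]]
--             board[om[0]][om[1]] = EMPTY
--             om = (om[0], om[1]+1)
--         # rotate / flip
--         elif move == 5:
--             if board[om[0]][om[1]] == OM1:
--                 board[om[0]][om[1]] = OM2
--             else:
--                 board[om[0]][om[1]] = OM1
--     return board
-- ===== SOURCE B (Python) =====
-- EMPTY = 0
-- OM1 = 3
-- OM2 = 4
--
-- DELTAS = {8: (-1, 0), 2: (1, 0), 4: (0, -1), 6: (0, 1)}
--
-- def piece_at(board, row, col):
--     if -1 < row < len(board) and -1 < col < len(board[row]):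
--         return board[row][col]
--     return EMPTY
--
-- def transform_board(board, om, moves):
--     # Never mutate a board: track only the OM position, the carried piece value,
--     # and the set of cells the OM has vacated (now EMPTY); a push target is
--     # occupied iff it was occupied in the ORIGINAL board and was never vacated
--     # (vacated cells are all EMPTY, and the target is never the current cell).
--     # The whole output board is then built in one final comprehension.
--     pos = (om[0], om[1])
--     carried = piece_at(board, pos[0], pos[1])
--     vacated = set()
--     for move in moves:
--         if move in DELTAS:
--             dr, dc = DELTAS[move]
--             t = (pos[0] + dr, pos[1] + dc)
--             if t not in vacated and piece_at(board, t[0], t[1]) != EMPTY: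
--                 vacated.add(pos)
--                 pos = t
--         elif move == 5:
--             carried = OM2 if carried == OM1 else OM1
--     return [[carried if (i, j) == pos else (EMPTY if (i, j) in vacated else v)
--              for j, v in enumerate(row)] for i, row in enumerate(board)]
-- ===== Notes on version B (the rewrite author's own statement) =====
-- stated objective: alternative
-- what changed: B never mutates a board: instead of applying each move to a copied grid, it tracks only the OM position, the carried piece value and the set of vacated cells (a push target is occupied iff it is occupied in the original board and never vacated), then builds the whole output board in one final comprehension.
-- outside the precondition, e.g. on transform_board([[1, 2]], (0, -1), [5]): A returns [[1, 3]], B returns [[1, 2]]; on transform_board([[0, 2], [3, 4]], (-1, 0), [8, 2, 5]): A returns [[0, 2], [4, 4]], B returns [[0, 2], [3, 4]]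
import Mathlib
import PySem

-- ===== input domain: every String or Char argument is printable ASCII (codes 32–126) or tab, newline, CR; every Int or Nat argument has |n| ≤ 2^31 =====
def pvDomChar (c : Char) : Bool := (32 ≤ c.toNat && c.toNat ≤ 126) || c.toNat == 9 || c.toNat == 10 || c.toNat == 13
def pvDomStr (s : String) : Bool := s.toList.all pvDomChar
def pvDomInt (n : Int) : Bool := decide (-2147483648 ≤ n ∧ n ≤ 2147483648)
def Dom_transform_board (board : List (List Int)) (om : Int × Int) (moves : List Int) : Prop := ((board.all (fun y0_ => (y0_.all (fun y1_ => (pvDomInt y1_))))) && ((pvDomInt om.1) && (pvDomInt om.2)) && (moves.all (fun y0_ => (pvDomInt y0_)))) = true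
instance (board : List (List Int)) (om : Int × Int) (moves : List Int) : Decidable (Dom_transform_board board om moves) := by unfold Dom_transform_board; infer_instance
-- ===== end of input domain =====

-- B never mutates a board: it tracks only the OM position, the carried piece value and the
-- set of vacated cells, and builds the whole output board in one final pass (objective:
-- alternative). A mutates only its local copy of the board, so there is no caller-observable
-- side effect to match.

-- ===== PORT A =====
def pvPieceAt (board : List (List Int)) (row col : Int) : Int :=
  if -1 < row ∧ row < (board.length : Int) then
    -- board[row]: 0 ≤ row < len(board) holds here, so plain indexing is exact
    if -1 < col ∧ col < ((board.getD row.toNat []).length : Int) then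
      (board.getD row.toNat []).getD col.toNat 0
    else 0
  else 0

-- board[r][c] read; exact whenever 0 ≤ r < len(board) and 0 ≤ c < len(board[r]),
-- which holds at every use inside Pre_
def pvCell (board : List (List Int)) (r c : Int) : Int :=
  (board.getD r.toNat []).getD c.toNat 0

-- board[r][c] = v under the same in-range condition
def pvSet (board : List (List Int)) (r c : Int) (v : Int) : List (List Int) :=
  board.set r.toNat ((board.getD r.toNat []).set c.toNat v)

def pvStepA (st : List (List Int) × Int × Int) (move : Int) : List (List Int) × Int × Int :=
  let b := st.1
  let r := st.2.1
  let c := st.2.2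
  if move = 8 ∧ pvPieceAt b (r-1) c ≠ 0 then
    (pvSet (pvSet b (r-1) c (pvCell b r c)) r c 0, r-1, c)
  else if move = 2 ∧ pvPieceAt b (r+1) c ≠ 0 then
    (pvSet (pvSet b (r+1) c (pvCell b r c)) r c 0, r+1, c)
  else if move = 4 ∧ pvPieceAt b r (c-1) ≠ 0 then
    (pvSet (pvSet b r (c-1) (pvCell b r c)) r c 0, r, c-1)
  else if move = 6 ∧ pvPieceAt b r (c+1) ≠ 0 then
    (pvSet (pvSet b r (c+1) (pvCell b r c)) r c 0, r, c+1)
  else if move = 5 then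
    (pvSet b r c (if pvCell b r c = 3 then 4 else 3), r, c)
  else st

def transform_board (board : List (List Int)) (om : Int × Int) (moves : List Int) : List (List Int) :=
  (moves.foldl pvStepA (board, om.1, om.2)).1

-- ===== PORT B =====
def pvDeltas : PySem.Dict Int (Int × Int) :=
  PySem.Dict.ofList [(8, (-1, 0)), (2, (1, 0)), (4, (0, -1)), (6, (0, 1))]

-- one loop step on B's state (pos, carried, vacated); the board is read-only
def pvStepB (board : List (List Int))
    (st : (Int × Int) × Int × PySem.Set (Int × Int)) (move : Int) :
    (Int × Int) × Int × PySem.Set (Int × Int) :=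
  let pos := st.1
  let carried := st.2.1
  let vac := st.2.2
  match pvDeltas.get? move with
  | some d =>
      let t := (pos.1 + d.1, pos.2 + d.2)
      if ¬ PySem.Set.contains vac t ∧ pvPieceAt board t.1 t.2 ≠ 0 then
        (t, carried, PySem.Set.add vac pos)
      else st
  | none =>
      if move = 5 then (pos, (if carried = 3 then 4 else 3), vac) else st

def transform_board_alt (board : List (List Int)) (om : Int × Int) (moves : List Int) :
    List (List Int) :=
  let fin := moves.foldl (pvStepB board) ((om.1, om.2), pvPieceAt board om.1 om.2, PySem.Set.empty)
  (PySem.List.enumerate board 0).map (fun p =>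
    (PySem.List.enumerate p.2 0).map (fun q =>
      if (p.1, q.1) = fin.1 then fin.2.1
      else if PySem.Set.contains fin.2.2 (p.1, q.1) then 0 else q.2))

-- ===== PRECONDITION & SPEC =====
-- the cell (r, c) holds no piece: it is off the board or EMPTY (the piece_at rule)
def pvNbEmpty (board : List (List Int)) (r c : Int) : Prop :=
  ¬ (-1 < r ∧ r < (board.length : Int) ∧ -1 < c ∧
      c < ((board.getD r.toNat []).length : Int) ∧ (board.getD r.toNat []).getD c.toNat 0 ≠ 0)

-- Pre_ admits every input whose initial om lies on the board, any input whose moves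
-- contain no push/flip code, and any input without flips whose om has only empty/off-board
-- neighbours (A only copies the board in the latter two cases). It excludes inputs that
-- combine an off-board om with a move that would actually fire: there A may raise
-- IndexError or silently wrap through Python's negative indexing, an accident of list
-- indexing no caller relies on.
def Pre_transform_board (board : List (List Int)) (om : Int × Int) (moves : List Int) : Prop :=
  (0 ≤ om.1 ∧ om.1 < (board.length : Int) ∧ 0 ≤ om.2 ∧
      om.2 < ((board.getD om.1.toNat []).length : Int)) ∨
  (∀ m ∈ moves, ¬ (m = 8 ∨ m = 2 ∨ m = 4 ∨ m = 6 ∨ m = 5)) ∨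
  ((∀ m ∈ moves, ¬ m = 5) ∧ pvNbEmpty board (om.1 - 1) om.2 ∧ pvNbEmpty board (om.1 + 1) om.2 ∧
    pvNbEmpty board om.1 (om.2 - 1) ∧ pvNbEmpty board om.1 (om.2 + 1))

instance (board : List (List Int)) (om : Int × Int) (moves : List Int) : Decidable (Pre_transform_board board om moves) := by unfold Pre_transform_board pvNbEmpty; infer_instance

def pvWitness_transform_board : List (List Int) × (Int × Int) × List Int :=
  ([[3, 0], [1, 2]], (0, 0), [5, 6, 2])

def Spec_transform_board (board : List (List Int)) (om : Int × Int) (moves : List Int) (out : List (List Int)) : Prop := out = transform_board_alt board om moves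
instance (board : List (List Int)) (om : Int × Int) (moves : List Int) (out : List (List Int)) : Decidable (Spec_transform_board board om moves out) := by unfold Spec_transform_board; infer_instance

-- ===== CLAIM (what is proved, stated in full; the proofs are below) =====
def Claim_equal_transform_board : Prop := ∀ (board : List (List Int)) (om : Int × Int) (moves : List Int), Dom_transform_board board om moves → Pre_transform_board board om moves → Spec_transform_board board om moves (transform_board board om moves)

-- ===== LEMMAS AND PROOFS =====

-- the position (r, c) is a cell of board b
def pvInB (b : List (List Int)) (r c : Int) : Prop :=
  0 ≤ r ∧ r < (b.length : Int) ∧ 0 ≤ c ∧ c < ((b.getD r.toNat []).length : Int)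

-- A's current board b is the original board with the vacated cells emptied and the
-- carried value at pos
def pvRel (board b : List (List Int)) (pos : Int × Int) (carried : Int)
    (vac : PySem.Set (Int × Int)) : Prop :=
  ∀ i j : Int, pvPieceAt b i j =
    if (i, j) = pos then carried
    else if (i, j) ∈ vac then 0
    else pvPieceAt board i j

lemma pvContains_iff (s : PySem.Set (Int × Int)) (x : Int × Int) :
    PySem.Set.contains s x = true ↔ x ∈ s := by
  simp [PySem.Set.contains]

-- evaluates B's literal direction dict on an arbitrary key
lemma pvDeltas_get? (m : Int) : pvDeltas.get? m =
    if m = 8 then some (-1, 0) else if m = 2 then some (1, 0)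
    else if m = 4 then some (0, -1) else if m = 6 then some (0, 1) else none := by
  have h : pvDeltas = PySem.Dict.mk [(8, (-1, 0)), (2, (1, 0)), (4, (0, -1)), (6, (0, 1))] := by
    decide
  rw [h]
  simp only [PySem.Dict.get?_mk_cons, PySem.Dict.get?, beq_iff_eq]
  split_ifs <;> simp_all <;> omega

lemma getD_set_lt {α : Type} (l : List α) (n m : Nat) (x d : α) (hn : n < l.length) :
    (l.set n x).getD m d = if m = n then x else l.getD m d := by
  simp only [List.getD_eq_getElem?_getD, List.getElem?_set]
  by_cases h : m = n
  · subst h; simp [hn]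
  · have h' : ¬ n = m := fun hh => h hh.symm
    simp [h, h']

lemma pvSet_map_length (b : List (List Int)) (r c v : Int) :
    (pvSet b r c v).map List.length = b.map List.length := by
  unfold pvSet
  apply List.ext_getElem
  · simp
  · intro n h1 h2
    simp only [List.getElem_map, List.getElem_set]
    split_ifs with h
    · subst h
      simp [List.getD_eq_getElem?_getD, List.getElem?_eq_getElem (by simpa using h2)]
    · rfl

lemma pvInB_of_shape {b b' : List (List Int)} {r c : Int}
    (hsh : b'.map List.length = b.map List.length) (h : pvInB b r c) : pvInB b' r c := by
  obtain ⟨h1, h2, h3, h4⟩ := h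
  have hl : b'.length = b.length := by simpa using congrArg List.length hsh
  have hn : r.toNat < b.length := by omega
  have hn' : r.toNat < b'.length := by omega
  have hrow : (b'.getD r.toNat []).length = (b.getD r.toNat []).length := by
    have hq := congrArg (fun l => l[r.toNat]?) hsh
    simp only [List.getElem?_map, List.getElem?_eq_getElem hn, List.getElem?_eq_getElem hn',
      Option.map_some, Option.some.injEq] at hq
    simpa [List.getD_eq_getElem?_getD, List.getElem?_eq_getElem hn,
      List.getElem?_eq_getElem hn'] using hq
  exact ⟨h1, by omega, h3, by omega⟩

lemma pvInB_of_pieceAt_ne {b : List (List Int)} {a d : Int}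
    (h : pvPieceAt b a d ≠ 0) : pvInB b a d := by
  unfold pvPieceAt at h
  unfold pvInB
  split_ifs at h with h1 h2
  · exact ⟨by omega, by omega, by omega, by omega⟩
  · exact absurd rfl h
  · exact absurd rfl h

lemma pvCell_eq_pieceAt {b : List (List Int)} {r c : Int} (h : pvInB b r c) :
    pvCell b r c = pvPieceAt b r c := by
  obtain ⟨h1, h2, h3, h4⟩ := h
  unfold pvCell pvPieceAt
  rw [if_pos (by omega), if_pos (by omega)]

lemma pvPieceAt_pvSet {b : List (List Int)} {r c : Int} (hin : pvInB b r c) (v a d : Int) :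
    pvPieceAt (pvSet b r c v) a d = if a = r ∧ d = c then v else pvPieceAt b a d := by
  obtain ⟨hr0, hr1, hc0, hc1⟩ := hin
  have hn : r.toNat < b.length := by omega
  unfold pvPieceAt pvSet
  by_cases haR : a = r
  · subst haR
    simp only [List.length_set, getD_set_lt b a.toNat _ _ [] hn,
      getD_set_lt (b.getD a.toNat []) c.toNat _ _ 0 (by omega)]
    split_ifs <;> first | rfl | omega | (simp_all; omega) | (simp_all [List.getElem?_set] <;> split_ifs <;> first | rfl | omega)
  · simp only [List.length_set, getD_set_lt b r.toNat _ _ [] hn]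
    split_ifs <;> first | rfl | omega | (simp_all; omega) | (simp_all [List.getElem?_set] <;> split_ifs <;> first | rfl | omega)

lemma pvRow_len {b b' : List (List Int)}
    (hsh : b'.map List.length = b.map List.length) (n : Nat)
    (hn : n < b.length) (hn' : n < b'.length) :
    (b'[n]'hn').length = (b[n]'hn).length := by
  have hq := congrArg (fun l => l[n]?) hsh
  simp only [List.getElem?_map, List.getElem?_eq_getElem hn, List.getElem?_eq_getElem hn',
    Option.map_some, Option.some.injEq] at hq
  exact hq

lemma pvPieceAt_natCast (b : List (List Int)) (n m : Nat)
    (hn : n < b.length) (hm : m < (b[n]'hn).length) :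
    pvPieceAt b (n : Int) (m : Int) = (b[n]'hn)[m]'hm := by
  unfold pvPieceAt
  simp only [Int.toNat_natCast]
  have hgd : b.getD n [] = b[n]'hn := by
    simp [List.getD_eq_getElem?_getD, List.getElem?_eq_getElem hn]
  rw [if_pos (by constructor <;> [omega; exact_mod_cast hn]), hgd,
    if_pos (by constructor <;> [omega; exact_mod_cast hm])]
  simp [List.getD_eq_getElem?_getD, List.getElem?_eq_getElem hm]

-- a successful push in A corresponds exactly to a successful push in B
lemma pvPush_sim {board b : List (List Int)} {pos : Int × Int} {carried : Int}
    {vac : PySem.Set (Int × Int)}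
    (hrel : pvRel board b pos carried vac) (hin : pvInB b pos.1 pos.2)
    (hsh : b.map List.length = board.map List.length)
    {t : Int × Int} (htp : t ≠ pos) :
    (pvPieceAt b t.1 t.2 ≠ 0 ↔
      (¬ PySem.Set.contains vac t = true ∧ pvPieceAt board t.1 t.2 ≠ 0)) ∧
    (pvPieceAt b t.1 t.2 ≠ 0 →
      pvRel board (pvSet (pvSet b t.1 t.2 (pvCell b pos.1 pos.2)) pos.1 pos.2 0) t carried
        (PySem.Set.add vac pos) ∧
      pvInB (pvSet (pvSet b t.1 t.2 (pvCell b pos.1 pos.2)) pos.1 pos.2 0) t.1 t.2 ∧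
      (pvSet (pvSet b t.1 t.2 (pvCell b pos.1 pos.2)) pos.1 pos.2 0).map List.length =
        board.map List.length) := by
  have hcond : pvPieceAt b t.1 t.2 =
      if t ∈ vac then (0 : Int) else pvPieceAt board t.1 t.2 := by
    simpa [htp] using hrel t.1 t.2
  constructor
  · rw [hcond]
    by_cases hv : t ∈ vac <;> simp [hv, pvContains_iff]
  · intro hA
    have hinT : pvInB b t.1 t.2 := pvInB_of_pieceAt_ne hA
    have hcar : pvCell b pos.1 pos.2 = carried := by
      rw [pvCell_eq_pieceAt hin, hrel pos.1 pos.2]; simp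
    have hsh1 : (pvSet b t.1 t.2 (pvCell b pos.1 pos.2)).map List.length = b.map List.length :=
      pvSet_map_length b t.1 t.2 _
    have hin1pos : pvInB (pvSet b t.1 t.2 (pvCell b pos.1 pos.2)) pos.1 pos.2 :=
      pvInB_of_shape hsh1 hin
    have hin1t : pvInB (pvSet b t.1 t.2 (pvCell b pos.1 pos.2)) t.1 t.2 :=
      pvInB_of_shape hsh1 hinT
    have hsh2 : (pvSet (pvSet b t.1 t.2 (pvCell b pos.1 pos.2)) pos.1 pos.2 0).map List.length =
        (pvSet b t.1 t.2 (pvCell b pos.1 pos.2)).map List.length :=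
      pvSet_map_length _ pos.1 pos.2 0
    refine ⟨?_, pvInB_of_shape hsh2 hin1t, hsh2.trans (hsh1.trans hsh)⟩
    intro i j
    rw [pvPieceAt_pvSet hin1pos, pvPieceAt_pvSet hinT, hrel i j, hcar]
    have htp' : ¬ (t.1 = pos.1 ∧ t.2 = pos.2) := by
      intro hh; exact htp (Prod.ext hh.1 hh.2)
    simp only [Prod.ext_iff, PySem.Set.mem_add]
    split_ifs <;> simp_all

-- one loop step preserves the simulation
lemma pvStep_sim {board b : List (List Int)} {pos : Int × Int} {carried : Int}
    {vac : PySem.Set (Int × Int)} (move : Int)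
    (hrel : pvRel board b pos carried vac) (hin : pvInB b pos.1 pos.2)
    (hsh : b.map List.length = board.map List.length) :
    (pvStepA (b, pos.1, pos.2) move).2 = (pvStepB board (pos, carried, vac) move).1 ∧
    pvRel board (pvStepA (b, pos.1, pos.2) move).1
      (pvStepB board (pos, carried, vac) move).1
      (pvStepB board (pos, carried, vac) move).2.1
      (pvStepB board (pos, carried, vac) move).2.2 ∧
    pvInB (pvStepA (b, pos.1, pos.2) move).1 (pvStepA (b, pos.1, pos.2) move).2.1
      (pvStepA (b, pos.1, pos.2) move).2.2 ∧
    (pvStepA (b, pos.1, pos.2) move).1.map List.length = board.map List.length := by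
  have hcar : pvCell b pos.1 pos.2 = carried := by
    rw [pvCell_eq_pieceAt hin, hrel pos.1 pos.2]; simp
  by_cases h8 : move = 8
  · subst h8
    have hget : pvDeltas.get? 8 = some (-1, 0) := by decide
    have htp : (((pos.1 - 1), (pos.2)) : Int × Int) ≠ pos := by
      intro hh
      have h1 : (pos.1 - 1) = pos.1 := congrArg Prod.fst hh
      omega
    obtain ⟨hiff, hmain⟩ := pvPush_sim hrel hin hsh htp
    by_cases hA : pvPieceAt b (pos.1 - 1) (pos.2) = 0
    · have hBn : ¬ (¬ PySem.Set.contains vac ((pos.1 - 1), (pos.2)) = true ∧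
          pvPieceAt board (pos.1 - 1) (pos.2) ≠ 0) := fun hh => (hiff.mpr hh) hA
      have eA : pvStepA (b, pos.1, pos.2) 8 = (b, pos.1, pos.2) := by
        simp [pvStepA, hA]
      have eB : pvStepB board (pos, carried, vac) 8 = (pos, carried, vac) := by
        simp only [pvStepB, hget]
        simp only [add_zero, show pos.1 + -1 = pos.1 - 1 from by ring,
          show pos.2 + -1 = pos.2 - 1 from by ring]
        rw [if_neg hBn]
      rw [eA, eB]
      exact ⟨rfl, hrel, hin, hsh⟩
    · obtain ⟨hB1, hB2⟩ := hiff.mp hA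
      obtain ⟨hrel', hinT, hsh'⟩ := hmain hA
      have eA : pvStepA (b, pos.1, pos.2) 8 =
          (pvSet (pvSet b (pos.1 - 1) (pos.2) (pvCell b pos.1 pos.2)) pos.1 pos.2 0,
            (pos.1 - 1), (pos.2)) := by
        simp [pvStepA, hA]
      have eB : pvStepB board (pos, carried, vac) 8 =
          (((pos.1 - 1), (pos.2)), carried, PySem.Set.add vac pos) := by
        simp only [pvStepB, hget]
        simp only [add_zero, show pos.1 + -1 = pos.1 - 1 from by ring,
          show pos.2 + -1 = pos.2 - 1 from by ring]
        rw [if_pos ⟨hB1, hB2⟩]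
      rw [eA, eB]
      exact ⟨rfl, hrel', hinT, hsh'⟩
  by_cases h2 : move = 2
  · subst h2
    have hget : pvDeltas.get? 2 = some (1, 0) := by decide
    have htp : (((pos.1 + 1), (pos.2)) : Int × Int) ≠ pos := by
      intro hh
      have h1 : (pos.1 + 1) = pos.1 := congrArg Prod.fst hh
      omega
    obtain ⟨hiff, hmain⟩ := pvPush_sim hrel hin hsh htp
    by_cases hA : pvPieceAt b (pos.1 + 1) (pos.2) = 0
    · have hBn : ¬ (¬ PySem.Set.contains vac ((pos.1 + 1), (pos.2)) = true ∧
          pvPieceAt board (pos.1 + 1) (pos.2) ≠ 0) := fun hh => (hiff.mpr hh) hA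
      have eA : pvStepA (b, pos.1, pos.2) 2 = (b, pos.1, pos.2) := by
        simp [pvStepA, hA]
      have eB : pvStepB board (pos, carried, vac) 2 = (pos, carried, vac) := by
        simp only [pvStepB, hget]
        simp only [add_zero, show pos.1 + -1 = pos.1 - 1 from by ring,
          show pos.2 + -1 = pos.2 - 1 from by ring]
        rw [if_neg hBn]
      rw [eA, eB]
      exact ⟨rfl, hrel, hin, hsh⟩
    · obtain ⟨hB1, hB2⟩ := hiff.mp hA
      obtain ⟨hrel', hinT, hsh'⟩ := hmain hA
      have eA : pvStepA (b, pos.1, pos.2) 2 =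
          (pvSet (pvSet b (pos.1 + 1) (pos.2) (pvCell b pos.1 pos.2)) pos.1 pos.2 0,
            (pos.1 + 1), (pos.2)) := by
        simp [pvStepA, hA]
      have eB : pvStepB board (pos, carried, vac) 2 =
          (((pos.1 + 1), (pos.2)), carried, PySem.Set.add vac pos) := by
        simp only [pvStepB, hget]
        simp only [add_zero, show pos.1 + -1 = pos.1 - 1 from by ring,
          show pos.2 + -1 = pos.2 - 1 from by ring]
        rw [if_pos ⟨hB1, hB2⟩]
      rw [eA, eB]
      exact ⟨rfl, hrel', hinT, hsh'⟩
  by_cases h4 : move = 4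
  · subst h4
    have hget : pvDeltas.get? 4 = some (0, -1) := by decide
    have htp : (((pos.1), (pos.2 - 1)) : Int × Int) ≠ pos := by
      intro hh
      have h2 : (pos.2 - 1) = pos.2 := congrArg Prod.snd hh
      omega
    obtain ⟨hiff, hmain⟩ := pvPush_sim hrel hin hsh htp
    by_cases hA : pvPieceAt b (pos.1) (pos.2 - 1) = 0
    · have hBn : ¬ (¬ PySem.Set.contains vac ((pos.1), (pos.2 - 1)) = true ∧
          pvPieceAt board (pos.1) (pos.2 - 1) ≠ 0) := fun hh => (hiff.mpr hh) hA
      have eA : pvStepA (b, pos.1, pos.2) 4 = (b, pos.1, pos.2) := by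
        simp [pvStepA, hA]
      have eB : pvStepB board (pos, carried, vac) 4 = (pos, carried, vac) := by
        simp only [pvStepB, hget]
        simp only [add_zero, show pos.1 + -1 = pos.1 - 1 from by ring,
          show pos.2 + -1 = pos.2 - 1 from by ring]
        rw [if_neg hBn]
      rw [eA, eB]
      exact ⟨rfl, hrel, hin, hsh⟩
    · obtain ⟨hB1, hB2⟩ := hiff.mp hA
      obtain ⟨hrel', hinT, hsh'⟩ := hmain hA
      have eA : pvStepA (b, pos.1, pos.2) 4 =
          (pvSet (pvSet b (pos.1) (pos.2 - 1) (pvCell b pos.1 pos.2)) pos.1 pos.2 0,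
            (pos.1), (pos.2 - 1)) := by
        simp [pvStepA, hA]
      have eB : pvStepB board (pos, carried, vac) 4 =
          (((pos.1), (pos.2 - 1)), carried, PySem.Set.add vac pos) := by
        simp only [pvStepB, hget]
        simp only [add_zero, show pos.1 + -1 = pos.1 - 1 from by ring,
          show pos.2 + -1 = pos.2 - 1 from by ring]
        rw [if_pos ⟨hB1, hB2⟩]
      rw [eA, eB]
      exact ⟨rfl, hrel', hinT, hsh'⟩
  by_cases h6 : move = 6
  · subst h6
    have hget : pvDeltas.get? 6 = some (0, 1) := by decide
    have htp : (((pos.1), (pos.2 + 1)) : Int × Int) ≠ pos := by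
      intro hh
      have h2 : (pos.2 + 1) = pos.2 := congrArg Prod.snd hh
      omega
    obtain ⟨hiff, hmain⟩ := pvPush_sim hrel hin hsh htp
    by_cases hA : pvPieceAt b (pos.1) (pos.2 + 1) = 0
    · have hBn : ¬ (¬ PySem.Set.contains vac ((pos.1), (pos.2 + 1)) = true ∧
          pvPieceAt board (pos.1) (pos.2 + 1) ≠ 0) := fun hh => (hiff.mpr hh) hA
      have eA : pvStepA (b, pos.1, pos.2) 6 = (b, pos.1, pos.2) := by
        simp [pvStepA, hA]
      have eB : pvStepB board (pos, carried, vac) 6 = (pos, carried, vac) := by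
        simp only [pvStepB, hget]
        simp only [add_zero, show pos.1 + -1 = pos.1 - 1 from by ring,
          show pos.2 + -1 = pos.2 - 1 from by ring]
        rw [if_neg hBn]
      rw [eA, eB]
      exact ⟨rfl, hrel, hin, hsh⟩
    · obtain ⟨hB1, hB2⟩ := hiff.mp hA
      obtain ⟨hrel', hinT, hsh'⟩ := hmain hA
      have eA : pvStepA (b, pos.1, pos.2) 6 =
          (pvSet (pvSet b (pos.1) (pos.2 + 1) (pvCell b pos.1 pos.2)) pos.1 pos.2 0,
            (pos.1), (pos.2 + 1)) := by
        simp [pvStepA, hA]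
      have eB : pvStepB board (pos, carried, vac) 6 =
          (((pos.1), (pos.2 + 1)), carried, PySem.Set.add vac pos) := by
        simp only [pvStepB, hget]
        simp only [add_zero, show pos.1 + -1 = pos.1 - 1 from by ring,
          show pos.2 + -1 = pos.2 - 1 from by ring]
        rw [if_pos ⟨hB1, hB2⟩]
      rw [eA, eB]
      exact ⟨rfl, hrel', hinT, hsh'⟩
  by_cases h5 : move = 5
  · subst h5
    have hget : pvDeltas.get? 5 = none := by decide
    have eA : pvStepA (b, pos.1, pos.2) 5 =
        (pvSet b pos.1 pos.2 (if pvCell b pos.1 pos.2 = 3 then 4 else 3), pos.1, pos.2) := by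
      simp [pvStepA]
    have eB : pvStepB board (pos, carried, vac) 5 =
        (pos, (if carried = 3 then 4 else 3), vac) := by
      simp [pvStepB, hget]
    rw [eA, eB]
    refine ⟨rfl, ?_, pvInB_of_shape (pvSet_map_length b pos.1 pos.2 _) hin,
      (pvSet_map_length b pos.1 pos.2 _).trans hsh⟩
    intro i j
    rw [pvPieceAt_pvSet hin, hrel i j, hcar]
    simp only [Prod.ext_iff]
    split_ifs <;> simp_all
  · have hget : pvDeltas.get? move = none := by
      rw [pvDeltas_get?]
      simp [h8, h2, h4, h6]
    have eA : pvStepA (b, pos.1, pos.2) move = (b, pos.1, pos.2) := by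
      simp [pvStepA, h8, h2, h4, h6, h5]
    have eB : pvStepB board (pos, carried, vac) move = (pos, carried, vac) := by
      simp [pvStepB, hget, h5]
    rw [eA, eB]
    exact ⟨rfl, hrel, hin, hsh⟩

lemma pvFold_sim (moves : List Int) :
    ∀ (board b : List (List Int)) (pos : Int × Int) (carried : Int)
      (vac : PySem.Set (Int × Int)),
    pvRel board b pos carried vac → pvInB b pos.1 pos.2 →
    b.map List.length = board.map List.length →
    pvRel board (moves.foldl pvStepA (b, pos.1, pos.2)).1
      (moves.foldl (pvStepB board) (pos, carried, vac)).1
      (moves.foldl (pvStepB board) (pos, carried, vac)).2.1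
      (moves.foldl (pvStepB board) (pos, carried, vac)).2.2 ∧
    (moves.foldl pvStepA (b, pos.1, pos.2)).1.map List.length = board.map List.length := by
  induction moves with
  | nil =>
    intro board b pos carried vac hrel hin hsh
    exact ⟨hrel, hsh⟩
  | cons m ms ih =>
    intro board b pos carried vac hrel hin hsh
    obtain ⟨hpos, hrel', hin', hsh'⟩ := pvStep_sim m hrel hin hsh
    simp only [List.foldl_cons]
    have eA : pvStepA (b, pos.1, pos.2) m =
        ((pvStepA (b, pos.1, pos.2) m).1,
          (pvStepB board (pos, carried, vac) m).1.1,
          (pvStepB board (pos, carried, vac) m).1.2) := by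
      rw [← hpos]
    have eB : pvStepB board (pos, carried, vac) m =
        ((pvStepB board (pos, carried, vac) m).1,
          (pvStepB board (pos, carried, vac) m).2.1,
          (pvStepB board (pos, carried, vac) m).2.2) := rfl
    rw [eA, eB]
    refine ih board (pvStepA (b, pos.1, pos.2) m).1
      (pvStepB board (pos, carried, vac) m).1
      (pvStepB board (pos, carried, vac) m).2.1
      (pvStepB board (pos, carried, vac) m).2.2 hrel' ?_ hsh'
    rw [← hpos]
    exact hin'

-- B's final comprehension rebuilds exactly A's final board
lemma pvRebuild {board bf : List (List Int)} {pos : Int × Int} {carried : Int}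
    {vac : PySem.Set (Int × Int)}
    (hrel : pvRel board bf pos carried vac)
    (hsh : bf.map List.length = board.map List.length) :
    (PySem.List.enumerate board 0).map (fun p =>
      (PySem.List.enumerate p.2 0).map (fun q =>
        if (p.1, q.1) = pos then carried
        else if PySem.Set.contains vac (p.1, q.1) then 0 else q.2)) = bf := by
  have hl : bf.length = board.length := by simpa using congrArg List.length hsh
  apply List.ext_getElem
  · simp [PySem.List.length_enumerate, hl]
  · intro n h1 h2
    have hn : n < board.length := by simpa [PySem.List.length_enumerate] using h1
    have hn' : n < bf.length := by omega
    have hrow : (bf[n]'hn').length = (board[n]'hn).length := pvRow_len hsh n hn hn'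
    rw [List.getElem_map, PySem.List.getElem_enumerate]
    apply List.ext_getElem
    · simp [PySem.List.length_enumerate, hrow]
    · intro m hm1 hm2
      have hm : m < (board[n]'hn).length := by
        simpa [PySem.List.length_enumerate] using hm1
      have hm' : m < (bf[n]'hn').length := by omega
      rw [List.getElem_map, PySem.List.getElem_enumerate]
      have hb : pvPieceAt bf (n : Int) (m : Int) = (bf[n]'hn')[m]'hm' :=
        pvPieceAt_natCast bf n m hn' hm'
      have hb0 : pvPieceAt board (n : Int) (m : Int) = (board[n]'hn)[m]'hm :=
        pvPieceAt_natCast board n m hn hm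
      have hr := hrel (n : Int) (m : Int)
      rw [hb, hb0] at hr
      simp only [zero_add, pvContains_iff]
      exact hr.symm

-- the initial state of B's loop simulates the untouched board for ANY om
lemma pvInit_rel (board : List (List Int)) (pos : Int × Int) :
    pvRel board board pos (pvPieceAt board pos.1 pos.2) PySem.Set.empty := by
  intro i j
  by_cases h : ((i, j) : Int × Int) = pos
  · have h1 : i = pos.1 := congrArg Prod.fst h
    have h2 : j = pos.2 := congrArg Prod.snd h
    subst h1; subst h2
    simp [h]
  · simp [h, PySem.Set.empty]

lemma pvStepA_inert (st : List (List Int) × Int × Int) {m : Int}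
    (h : ¬ (m = 8 ∨ m = 2 ∨ m = 4 ∨ m = 6 ∨ m = 5)) : pvStepA st m = st := by
  push_neg at h
  obtain ⟨h8, h2, h4, h6, h5⟩ := h
  simp [pvStepA, h8, h2, h4, h6, h5]

lemma pvStepB_inert (board : List (List Int))
    (st : (Int × Int) × Int × PySem.Set (Int × Int)) {m : Int}
    (h : ¬ (m = 8 ∨ m = 2 ∨ m = 4 ∨ m = 6 ∨ m = 5)) : pvStepB board st m = st := by
  push_neg at h
  obtain ⟨h8, h2, h4, h6, h5⟩ := h
  have hget : pvDeltas.get? m = none := by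
    rw [pvDeltas_get?]
    simp [h8, h2, h4, h6]
  simp [pvStepB, hget, h5]

lemma pvFoldA_inert (moves : List Int)
    (h : ∀ m ∈ moves, ¬ (m = 8 ∨ m = 2 ∨ m = 4 ∨ m = 6 ∨ m = 5)) :
    ∀ st : List (List Int) × Int × Int, moves.foldl pvStepA st = st := by
  induction moves with
  | nil => intro st; rfl
  | cons m ms ih =>
    intro st
    rw [List.foldl_cons, pvStepA_inert st (h m (by simp))]
    exact ih (fun x hx => h x (by simp [hx])) st

lemma pvFoldB_inert (board : List (List Int)) (moves : List Int)
    (h : ∀ m ∈ moves, ¬ (m = 8 ∨ m = 2 ∨ m = 4 ∨ m = 6 ∨ m = 5)) :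
    ∀ st : (Int × Int) × Int × PySem.Set (Int × Int),
      moves.foldl (pvStepB board) st = st := by
  induction moves with
  | nil => intro st; rfl
  | cons m ms ih =>
    intro st
    rw [List.foldl_cons, pvStepB_inert board st (h m (by simp))]
    exact ih (fun x hx => h x (by simp [hx])) st

lemma pvNbEmpty_iff (board : List (List Int)) (r c : Int) :
    pvNbEmpty board r c ↔ pvPieceAt board r c = 0 := by
  unfold pvNbEmpty pvPieceAt
  split_ifs with h1 h2 <;> tauto

lemma pvStepA_stuck {b : List (List Int)} {r c : Int}
    (hN : pvPieceAt b (r - 1) c = 0) (hS : pvPieceAt b (r + 1) c = 0)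
    (hE : pvPieceAt b r (c - 1) = 0) (hW : pvPieceAt b r (c + 1) = 0)
    {m : Int} (h5 : ¬ m = 5) : pvStepA (b, r, c) m = (b, r, c) := by
  simp [pvStepA, hN, hS, hE, hW, h5]

lemma pvStepB_stuck (board : List (List Int)) {r c : Int} (car : Int)
    (vac : PySem.Set (Int × Int))
    (hN : pvPieceAt board (r - 1) c = 0) (hS : pvPieceAt board (r + 1) c = 0)
    (hE : pvPieceAt board r (c - 1) = 0) (hW : pvPieceAt board r (c + 1) = 0)
    {m : Int} (h5 : ¬ m = 5) :
    pvStepB board ((r, c), car, vac) m = ((r, c), car, vac) := by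
  by_cases h8 : m = 8
  · subst h8
    have hget : pvDeltas.get? 8 = some (-1, 0) := by decide
    have hz : pvPieceAt board (r + -1) (c + 0) = 0 := by
      simpa [show r + -1 = r - 1 from by ring] using hN
    simp only [pvStepB, hget]
    rw [if_neg (fun hh => hh.2 hz)]
  · by_cases h2 : m = 2
    · subst h2
      have hget : pvDeltas.get? 2 = some (1, 0) := by decide
      have hz : pvPieceAt board (r + 1) (c + 0) = 0 := by simpa using hS
      simp only [pvStepB, hget]
      rw [if_neg (fun hh => hh.2 hz)]
    · by_cases h4 : m = 4
      · subst h4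
        have hget : pvDeltas.get? 4 = some (0, -1) := by decide
        have hz : pvPieceAt board (r + 0) (c + -1) = 0 := by
          simpa [show c + -1 = c - 1 from by ring] using hE
        simp only [pvStepB, hget]
        rw [if_neg (fun hh => hh.2 hz)]
      · by_cases h6 : m = 6
        · subst h6
          have hget : pvDeltas.get? 6 = some (0, 1) := by decide
          have hz : pvPieceAt board (r + 0) (c + 1) = 0 := by simpa using hW
          simp only [pvStepB, hget]
          rw [if_neg (fun hh => hh.2 hz)]
        · have hget : pvDeltas.get? m = none := by
            rw [pvDeltas_get?]
            simp [h8, h2, h4, h6]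
          simp [pvStepB, hget, h5]

lemma pvFoldA_stuck {b : List (List Int)} {r c : Int} (moves : List Int)
    (hN : pvPieceAt b (r - 1) c = 0) (hS : pvPieceAt b (r + 1) c = 0)
    (hE : pvPieceAt b r (c - 1) = 0) (hW : pvPieceAt b r (c + 1) = 0)
    (h5 : ∀ m ∈ moves, ¬ m = 5) : moves.foldl pvStepA (b, r, c) = (b, r, c) := by
  induction moves with
  | nil => rfl
  | cons m ms ih =>
    rw [List.foldl_cons, pvStepA_stuck hN hS hE hW (h5 m (by simp))]
    exact ih (fun x hx => h5 x (by simp [hx]))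

lemma pvFoldB_stuck (board : List (List Int)) {r c : Int} (car : Int)
    (vac : PySem.Set (Int × Int)) (moves : List Int)
    (hN : pvPieceAt board (r - 1) c = 0) (hS : pvPieceAt board (r + 1) c = 0)
    (hE : pvPieceAt board r (c - 1) = 0) (hW : pvPieceAt board r (c + 1) = 0)
    (h5 : ∀ m ∈ moves, ¬ m = 5) :
    moves.foldl (pvStepB board) ((r, c), car, vac) = ((r, c), car, vac) := by
  induction moves with
  | nil => rfl
  | cons m ms ih =>
    rw [List.foldl_cons, pvStepB_stuck board car vac hN hS hE hW (h5 m (by simp))]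
    exact ih (fun x hx => h5 x (by simp [hx]))

-- ===== VERDICT (by name: the statement is the Claim_ definition above) =====
theorem transform_board_spec : Claim_equal_transform_board := by
  intro board om moves _ hpre
  unfold Spec_transform_board transform_board transform_board_alt
  rcases hpre with hin | hinert | ⟨h5, hN, hS, hE, hW⟩
  · obtain ⟨hrel', hsh⟩ := pvFold_sim moves board board (om.1, om.2)
      (pvPieceAt board om.1 om.2) PySem.Set.empty
      (pvInit_rel board (om.1, om.2)) hin rfl
    exact (pvRebuild hrel' hsh).symm
  · rw [pvFoldA_inert moves hinert, pvFoldB_inert board moves hinert]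
    exact (pvRebuild (pvInit_rel board (om.1, om.2)) rfl).symm
  · rw [(pvNbEmpty_iff _ _ _)] at hN hS hE hW
    rw [pvFoldA_stuck moves hN hS hE hW h5, pvFoldB_stuck board _ _ moves hN hS hE hW h5]
    exact (pvRebuild (pvInit_rel board (om.1, om.2)) rfl).symm
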